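-- pv_equiv track=rewrite | github.com/Kent-Madsen-Archived/Games-Identification-of-entities | streamline_formats.py | replace_extension_with_jpg
-- ===== SOURCE A (Python) =====
-- def replace_extension_with_jpg(file_name: str) -> str:
--     return_value: str = ''
--
--     tokens = file_name.split('.')
--
--     count_of_tokens = len(tokens)
--     location_of_extension = count_of_tokens - 1
--
--     tokens[location_of_extension] = 'jpg'
--
--     for index in range(len(tokens)):
--         current_token: str = tokens[index]
--
--         if index == 0:
--             return_value = return_value + current_token
--         else:
--             return_value = return_value + '.' + current_token
--
--     return return_value
-- ===== SOURCE B (Python) =====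
-- def replace_extension_with_jpg(file_name: str) -> str:
--     idx = file_name.rfind('.')
--     if idx == -1:
--         return 'jpg'
--     return file_name[:idx] + '.jpg'
-- ===== Notes on version B (the rewrite author's own statement) =====
-- stated objective: simpler
-- what changed: B locates the last dot with rfind and slices once (or returns 'jpg' when there is no dot), instead of splitting into a token list, overwriting the last token and rebuilding the string with an indexed loop.
import Mathlib
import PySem

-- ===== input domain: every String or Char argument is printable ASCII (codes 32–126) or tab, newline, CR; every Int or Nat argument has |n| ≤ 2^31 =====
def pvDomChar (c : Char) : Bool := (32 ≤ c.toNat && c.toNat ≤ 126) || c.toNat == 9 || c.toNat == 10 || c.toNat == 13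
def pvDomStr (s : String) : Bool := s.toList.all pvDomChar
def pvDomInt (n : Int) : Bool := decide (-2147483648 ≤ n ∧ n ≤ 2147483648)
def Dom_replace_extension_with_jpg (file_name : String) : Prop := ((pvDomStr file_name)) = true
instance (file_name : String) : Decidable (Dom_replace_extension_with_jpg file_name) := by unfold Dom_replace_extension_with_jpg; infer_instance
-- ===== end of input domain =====

-- ===== PORT A =====
-- Port of A: split on the dot character, overwrite the last token with 'jpg', rebuild with an indexed loop.
def replace_extension_with_jpg (file_name : String) : String :=
  let tokens : List (List Char) := (PySem.Chars.split? file_name.toList ['.']).getD []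
  let count_of_tokens : Int := tokens.length
  let location_of_extension : Int := count_of_tokens - 1
  let tokens := PySem.List.pySetD tokens location_of_extension "jpg".toList
  let return_value : List Char :=
    (PySem.List.pyRange 0 tokens.length).foldl
      (fun return_value index =>
        let current_token := PySem.List.pyGetD tokens index []
        if index = 0 then return_value ++ current_token
        else return_value ++ ['.'] ++ current_token) []
  String.ofList return_value

-- ===== PORT B =====
-- B: find the last dot with rfind; no dot -> "jpg", else slice up to it and append ".jpg".
def replace_extension_with_jpg_alt (file_name : String) : String :=
  let idx : Int := PySem.Str.rfind file_name "."
  if idx = -1 then "jpg"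
  else String.ofList (PySem.Chars.slice file_name.toList none (some idx) ++ ".jpg".toList)

-- ===== PRECONDITION & SPEC =====
def Spec_replace_extension_with_jpg (file_name : String) (out : String) : Prop := out = replace_extension_with_jpg_alt file_name
instance (file_name : String) (out : String) : Decidable (Spec_replace_extension_with_jpg file_name out) := by unfold Spec_replace_extension_with_jpg; infer_instance

-- ===== CLAIM (what is proved, stated in full; the proofs are below) =====
def Claim_equal_replace_extension_with_jpg : Prop := ∀ (file_name : String), Dom_replace_extension_with_jpg file_name → Spec_replace_extension_with_jpg file_name (replace_extension_with_jpg file_name)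

-- ===== LEMMAS AND PROOFS =====

lemma splitOn_go_single (c : Char) : ∀ (l : List Char) (fuel : Nat) (cur : List Char) (acc : List (List Char)),
    l.length ≤ fuel →
    PySem.Chars.splitOn.go [c] fuel l cur acc =
      acc.reverse ++ (l.splitOn c).modifyHead (cur.reverse ++ ·) := by
  intro l
  induction l with
  | nil =>
    intro fuel cur acc _
    cases fuel <;> simp [PySem.Chars.splitOn.go, List.splitOn]
  | cons d rest ih =>
    intro fuel cur acc hf
    cases fuel with
    | zero => simp at hf
    | succ f =>
      have hr : rest.length ≤ f := by simpa using hf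
      by_cases hdc : d = c
      · subst hdc
        have : [d].isPrefixOf (d :: rest) = true := by simp [List.isPrefixOf]
        simp only [PySem.Chars.splitOn.go, this, if_pos]
        show PySem.Chars.splitOn.go [d] f rest [] (cur.reverse :: acc) = _
        rw [ih f [] (cur.reverse :: acc) hr]
        obtain ⟨h, t, hht⟩ : ∃ h t, rest.splitOn d = h :: t := by
          rcases e : rest.splitOn d with _ | ⟨h, t⟩
          · exact absurd e (List.splitOnP_ne_nil _ _)
          · exact ⟨h, t, rfl⟩
        simp [List.splitOn, List.splitOnP_cons, hht, List.splitOn] at *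
        simp [hht]
      · have : [c].isPrefixOf (d :: rest) = false := by
          simp [List.isPrefixOf]; exact fun h => absurd h.symm hdc
        simp only [PySem.Chars.splitOn.go, this]
        rw [if_neg (by simp [this])]
        rw [ih f (d :: cur) acc hr]
        obtain ⟨h, t, hht⟩ : ∃ h t, rest.splitOn c = h :: t := by
          rcases e : rest.splitOn c with _ | ⟨h, t⟩
          · exact absurd e (List.splitOnP_ne_nil _ _)
          · exact ⟨h, t, rfl⟩
        simp only [List.splitOn] at hht ⊢
        rw [List.splitOnP_cons]
        simp [hdc, hht]

lemma chars_splitOn_eq (c : Char) (s : List Char) :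
    PySem.Chars.splitOn s [c] = s.splitOn c := by
  show PySem.Chars.splitOn.go [c] (s.length + 1) s [] [] = _
  rw [splitOn_go_single c s (s.length + 1) [] [] (by omega)]
  rcases e : s.splitOn c with _ | ⟨h, t⟩
  · exact absurd e (List.splitOnP_ne_nil _ _)
  · simp

lemma set_last_eq {α : Type} (ts : List α) (v : α) (h : ts ≠ []) :
    ts.set (ts.length - 1) v = ts.dropLast ++ [v] := by
  induction ts with
  | nil => simp at h
  | cons a l ih =>
    cases l with
    | nil => simp
    | cons b m =>
      simp only [List.length_cons, Nat.add_sub_cancel, List.set, List.dropLast_cons₂]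
      have := ih (by simp)
      simp only [List.length_cons, Nat.add_sub_cancel] at this
      simp [this]

lemma pySetD_last {α : Type} (ts : List α) (v : α) (h : ts ≠ []) :
    PySem.List.pySetD ts ((ts.length : Int) - 1) v = ts.dropLast ++ [v] := by
  have hl : 0 < ts.length := List.length_pos_iff.mpr h
  have : PySem.List.pyIdx? ts.length ((ts.length : Int) - 1) = some (ts.length - 1) := by
    have h0 : (0:Int) ≤ (ts.length : Int) - 1 := by omega
    have h1 : (ts.length : Int) - 1 < (ts.length : Int) := by omega
    simp only [PySem.List.pyIdx?, if_pos h0, if_pos h1, Option.some.injEq]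
    omega
  simp [PySem.List.pySetD, PySem.List.pySet?, this, set_last_eq ts v h]

lemma foldl_sep (t0 : List Char) : ∀ (rest : List (List Char)) (init : List Char),
    rest.foldl (fun rv t => rv ++ ['.'] ++ t) (init ++ t0) =
      init ++ ['.'].intercalate (t0 :: rest) := by
  intro rest
  induction rest generalizing t0 with
  | nil => intro init; simp [List.intercalate]
  | cons r rs ih =>
    intro init
    have : init ++ t0 ++ ['.'] ++ r = (init ++ t0 ++ ['.']) ++ r := by simp
    simp only [List.foldl_cons, this]
    rw [ih r (init ++ t0 ++ ['.'])]
    simp [List.intercalate]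

lemma loop_eq_intercalate (tokens : List (List Char)) (h : tokens ≠ []) :
    (PySem.List.pyRange 0 tokens.length).foldl
      (fun rv index =>
        let cur := PySem.List.pyGetD tokens index []
        if index = 0 then rv ++ cur else rv ++ ['.'] ++ cur) [] =
      ['.'].intercalate tokens := by
  obtain ⟨t0, rest, rfl⟩ : ∃ t0 rest, tokens = t0 :: rest := by
    rcases tokens with _ | ⟨t0, rest⟩
    · simp at h
    · exact ⟨t0, rest, rfl⟩
  have hn : (0:Int) < ((t0 :: rest).length : Int) := by simp
  rw [PySem.List.pyRange_one_cons hn]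
  simp only [List.foldl_cons, reduceIte]
  have hcongr : (PySem.List.pyRange 1 ((t0 :: rest).length : Int)).foldl
      (fun rv index =>
        let cur := PySem.List.pyGetD (t0 :: rest) index []
        if index = 0 then rv ++ cur else rv ++ ['.'] ++ cur)
      ([] ++ PySem.List.pyGetD (t0 :: rest) 0 []) =
      (PySem.List.pyRange 1 ((t0 :: rest).length : Int)).foldl
      (fun rv index => (fun rv t => rv ++ ['.'] ++ t) rv (PySem.List.pyGetD (t0 :: rest) index []))
      ([] ++ PySem.List.pyGetD (t0 :: rest) 0 []) := by
    apply PySem.List.foldl_congr_mem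
    intro acc x hx
    have : (1:Int) ≤ x := (PySem.List.mem_pyRange_one.mp hx).1
    have hx0 : x ≠ 0 := by omega
    simp [hx0]
  simp only [zero_add] at hcongr ⊢
  rw [hcongr]
  have hlen : ((t0 :: rest).length : Int) = PySem.List.len (t0 :: rest) := by
    simp [PySem.List.len]
  rw [hlen, PySem.List.foldl_pyRange_pyGetD (t0 :: rest) [] (fun rv t => rv ++ ['.'] ++ t)
      ([] ++ PySem.List.pyGetD (t0 :: rest) 0 []) (by norm_num)]
  have h0 : PySem.List.pyGetD (t0 :: rest) 0 [] = t0 := PySem.List.pyGetD_zero_cons t0 rest []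
  rw [h0]
  have := foldl_sep t0 rest []
  simpa using this

lemma rfind_go_zero (s sub : List Char) :
    PySem.Chars.rfind.go s sub 0 = if sub.isPrefixOf s then 0 else -1 := by
  simp [PySem.Chars.rfind.go]

lemma rfind_go_succ (s sub : List Char) (j : Nat) :
    PySem.Chars.rfind.go s sub (j + 1) =
      if sub.isPrefixOf (s.drop (j + 1)) then ((j : Int) + 1) else PySem.Chars.rfind.go s sub j := by
  simp [PySem.Chars.rfind.go]

lemma rfind_go_no_dot (s : List Char) (c : Char) : ∀ (n : Nat),
    (∀ k : Nat, k ≤ n → ¬ [c].isPrefixOf (s.drop k)) →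
    PySem.Chars.rfind.go s [c] n = -1 := by
  intro n
  induction n with
  | zero =>
    intro h
    rw [rfind_go_zero]
    have := h 0 (le_refl 0)
    simp at this
    simp [this]
  | succ j ih =>
    intro h
    rw [rfind_go_succ]
    have h1 := h (j + 1) (le_refl _)
    rw [if_neg (by simpa using h1)]
    exact ih (fun k hk => h k (by omega))

lemma rfind_go_at (s : List Char) (c : Char) (m : Nat) : ∀ (n : Nat),
    m ≤ n → [c].isPrefixOf (s.drop m) →
    (∀ k : Nat, m < k → k ≤ n → ¬ [c].isPrefixOf (s.drop k)) →
    PySem.Chars.rfind.go s [c] n = m := by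
  intro n
  induction n with
  | zero =>
    intro hmn hm _
    interval_cases m
    rw [rfind_go_zero]
    simp at hm
    simp [hm]
  | succ j ih =>
    intro hmn hm hno
    rw [rfind_go_succ]
    by_cases he : m = j + 1
    · subst he
      rw [if_pos (by simpa using hm)]
      push_cast; ring
    · have hlt : m ≤ j := by omega
      rw [if_neg (by simpa using hno (j+1) (by omega) (le_refl _))]
      exact ih hlt hm (fun k hk1 hk2 => hno k hk1 (by omega))

lemma isPrefixOf_single_drop (s : List Char) (c : Char) (k : Nat) :
    [c].isPrefixOf (s.drop k) = true ↔ ∃ suf, s.drop k = c :: suf := by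
  rcases e : s.drop k with _ | ⟨d, t⟩
  · simp [List.isPrefixOf]
  · simp only [List.isPrefixOf, Bool.and_eq_true, beq_iff_eq, List.isPrefixOf_nil_left, and_true]
    constructor
    · rintro rfl; exact ⟨t, rfl⟩
    · rintro ⟨suf, hsuf⟩
      cases hsuf
      rfl

lemma last_dot_decomp (c : Char) (s : List Char) (h : c ∈ s) :
    ∃ pre suf, s = pre ++ c :: suf ∧ c ∉ suf := by
  induction s with
  | nil => simp at h
  | cons d rest ih =>
    by_cases hr : c ∈ rest
    · obtain ⟨pre, suf, h1, h2⟩ := ih hr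
      exact ⟨d :: pre, suf, by simp [h1], h2⟩
    · have hd : d = c := by
        rcases List.mem_cons.mp h with h | h
        · exact h.symm
        · exact absurd h hr
      exact ⟨[], rest, by simp [hd], hr⟩

lemma splitOn_no_dot (c : Char) (s : List Char) (h : c ∉ s) : s.splitOn c = [s] := by
  induction s with
  | nil => simp [List.splitOn]
  | cons d rest ih =>
    have hd : ¬ d = c := fun e => h (by simp [e])
    have hr := ih (fun m => h (List.mem_cons_of_mem _ m))
    simp only [List.splitOn] at hr ⊢
    rw [List.splitOnP_cons]
    simp [hd, hr]

lemma splitOn_append_last (c : Char) (pre suf : List Char) (h : c ∉ suf) :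
    (pre ++ c :: suf).splitOn c = pre.splitOn c ++ [suf] := by
  induction pre with
  | nil =>
    simp only [List.nil_append, List.splitOn]
    rw [List.splitOnP_cons]
    simp [splitOn_no_dot c suf h, List.splitOn] at *
    simpa [List.splitOn] using splitOn_no_dot c suf h
  | cons d rest ih =>
    simp only [List.cons_append, List.splitOn] at ih ⊢
    rw [List.splitOnP_cons, List.splitOnP_cons]
    by_cases hd : d = c
    · simp [hd, ih]
    · simp only [hd, beq_iff_eq, if_neg hd]
      rw [ih]
      rcases e : List.splitOnP (fun x => x == c) rest with _ | ⟨hh, tt⟩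
      · exact absurd e (List.splitOnP_ne_nil _ _)
      · simp [e, hd]

lemma intercalate_append_singleton (sep : List Char) (xs : List (List Char)) (y : List Char) (h : xs ≠ []) :
    sep.intercalate (xs ++ [y]) = sep.intercalate xs ++ sep ++ y := by
  induction xs with
  | nil => simp at h
  | cons x rest ih =>
    rcases rest with _ | ⟨r, rs⟩
    · simp [List.intercalate]
    · have := ih (by simp)
      have e1 : sep.intercalate (x :: r :: rs) = x ++ sep ++ sep.intercalate (r :: rs) := by
        simp [List.intercalate, List.intersperse]
      have e2 : sep.intercalate (x :: r :: rs ++ [y]) = x ++ sep ++ sep.intercalate (r :: rs ++ [y]) := by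
        simp [List.intercalate, List.intersperse]
      rw [e2, this, e1]
      simp

lemma main_chars (cs : List Char) :
    ['.'].intercalate (((cs.splitOn '.').dropLast) ++ ["jpg".toList]) =
      (if PySem.Chars.rfind cs ['.'] = -1 then "jpg".toList
       else PySem.Chars.slice cs none (some (PySem.Chars.rfind cs ['.'])) ++ ".jpg".toList) := by
  by_cases hmem : '.' ∈ cs
  · obtain ⟨pre, suf, rfl, hsuf⟩ := last_dot_decomp '.' cs hmem
    have hm : PySem.Chars.rfind (pre ++ '.' :: suf) ['.'] = pre.length := by
      show PySem.Chars.rfind.go _ _ _ = _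
      rw [rfind_go_at (pre ++ '.' :: suf) '.' pre.length ((pre ++ '.' :: suf).length)
        (by simp)
        (by rw [isPrefixOf_single_drop]; exact ⟨suf, by simp⟩)
        ?_]
      intro k hk1 hk2 hpfx
      obtain ⟨s2, hs2⟩ := (isPrefixOf_single_drop _ _ _).mp hpfx
      have hk3 : k = (pre.length + 1) + (k - pre.length - 1) := by omega
      rw [hk3] at hs2
      have : (pre ++ '.' :: suf).drop ((pre.length + 1) + (k - pre.length - 1))
          = suf.drop (k - pre.length - 1) := by
        have : pre ++ '.' :: suf = (pre ++ ['.']) ++ suf := by simp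
        rw [this]
        have hl : (pre ++ ['.']).length = pre.length + 1 := by simp
        rw [← hl, List.drop_append]
        simp
      rw [this] at hs2
      have : '.' ∈ suf := List.drop_subset _ _ (by rw [hs2]; exact List.mem_cons_self)
      exact hsuf this
    rw [hm]
    rw [if_neg (by omega)]
    have hslice : PySem.Chars.slice (pre ++ '.' :: suf) none (some ((pre.length : Int))) = pre := by
      simp only [PySem.Chars.slice_eq_listSlice, PySem.List.slice_to_natCast]
      exact List.take_left
    rw [hslice]
    rw [splitOn_append_last '.' pre suf hsuf, List.dropLast_concat]
    rw [intercalate_append_singleton ['.'] _ _ (by unfold List.splitOn; exact List.splitOnP_ne_nil _ _)]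
    rw [List.intercalate_splitOn]
    simp
  · have hrf : PySem.Chars.rfind cs ['.'] = -1 := by
      show PySem.Chars.rfind.go _ _ _ = _
      apply rfind_go_no_dot
      intro k _ hpfx
      obtain ⟨s2, hs2⟩ := (isPrefixOf_single_drop _ _ _).mp hpfx
      exact hmem (List.drop_subset _ _ (by rw [hs2]; exact List.mem_cons_self))
    rw [hrf, if_pos rfl, splitOn_no_dot '.' cs hmem]
    simp [List.intercalate]

-- ===== VERDICT (by name: the statement is the Claim_ definition above) =====
theorem replace_extension_with_jpg_spec : Claim_equal_replace_extension_with_jpg := by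
  intro file_name _
  unfold Spec_replace_extension_with_jpg replace_extension_with_jpg replace_extension_with_jpg_alt
  have hsplit : (PySem.Chars.split? file_name.toList ['.']).getD [] = file_name.toList.splitOn '.' := by
    simp [PySem.Chars.split?, chars_splitOn_eq]
  simp only [hsplit]
  have hne : file_name.toList.splitOn '.' ≠ [] := by
    unfold List.splitOn; exact List.splitOnP_ne_nil _ _
  rw [pySetD_last _ _ hne]
  rw [loop_eq_intercalate _ (by simp)]
  rw [main_chars file_name.toList]
  have hrt : (".".toList) = ['.'] := rfl
  rw [PySem.Str.rfind_eq, hrt]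
  split
  · rfl
  · rfl
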